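-- pv_equiv track=rewrite | github.com/OzilooG/WorldCuisine | scripts/ParseAndAddDish.py | parse_email_js_template
-- ===== SOURCE A (Python) =====
-- from typing import List, Dict
--
-- def parse_email_js_template(data_string: str) -> Dict[str, str]:
--     parsed: Dict[str, str] = {}
--     lines = [line.strip() for line in data_string.splitlines() if line.strip()]
--
--     i = 0
--     while i < len(lines):
--         line = lines[i]
--         if line.endswith(':'):
--             key = line[:-1]
--             i += 1
--             if i < len(lines) and not lines[i].endswith(':'):
--                 parsed[key] = lines[i]
--                 i += 1
--             else:
--                 parsed[key] = ''
--         else: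
--             # skip unexpected formats
--             i += 1
--     return parsed
-- ===== SOURCE B (Python) =====
-- def parse_email_js_template(data_string: str):
--     parsed = {}
--     pending_key = None
--     for raw in data_string.splitlines():
--         line = raw.strip()
--         if not line:
--             continue
--         if line.endswith(':'):
--             if pending_key is not None:
--                 parsed[pending_key] = ''
--             pending_key = line[:-1]
--         elif pending_key is not None:
--             parsed[pending_key] = line
--             pending_key = None
--         # else: skip unexpected formats
--     if pending_key is not None:
--         parsed[pending_key] = ''
--     return parsed
-- ===== Notes on version B (the rewrite author's own statement) =====
-- stated objective: simpler
-- what changed: Replaced A's index-based while loop with one-element lookahead (i += 1 or 2) by a single forward for-loop carrying a pending_key state variable flushed at the end.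
import Mathlib
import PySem

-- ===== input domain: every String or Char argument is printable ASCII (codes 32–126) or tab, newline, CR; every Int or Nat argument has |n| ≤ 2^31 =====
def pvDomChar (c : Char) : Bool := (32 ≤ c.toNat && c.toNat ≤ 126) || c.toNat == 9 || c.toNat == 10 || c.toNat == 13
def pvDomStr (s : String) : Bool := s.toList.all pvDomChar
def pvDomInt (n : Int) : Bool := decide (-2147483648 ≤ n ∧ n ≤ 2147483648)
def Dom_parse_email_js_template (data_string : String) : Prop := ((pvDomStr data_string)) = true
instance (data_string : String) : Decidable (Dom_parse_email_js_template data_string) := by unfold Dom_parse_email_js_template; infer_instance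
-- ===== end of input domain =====

-- B replaces A's index-based while loop with lookahead by a single forward pass
-- carrying a pending_key state variable (objective: simpler decomposition, same cost).

-- ===== PORT A =====
-- A's while loop over an index i, transcribed as recursion on the suffix lines.drop i:
-- the i += 2 step consumes two list cells.
def pvLoopA : List String → PySem.Dict String String → PySem.Dict String String
  | [], parsed => parsed
  | line :: rest, parsed =>
    if PySem.Str.endswith line ":" then
      let key := PySem.Str.slice line none (some (-1))
      match rest with
      | next :: rest2 =>
        if PySem.Str.endswith next ":" = false then
          pvLoopA rest2 (parsed.insert key next)
        else
          pvLoopA (next :: rest2) (parsed.insert key "")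
      | [] => parsed.insert key ""   -- rest = [], the loop exits right after
    else
      pvLoopA rest parsed

def parse_email_js_template (data_string : String) : List (String × String) :=
  let lines := ((PySem.Str.splitlines data_string).filter
      (fun l => PySem.Str.strip l ≠ "")).map PySem.Str.strip
  (pvLoopA lines PySem.Dict.empty).items

-- ===== PORT B =====
-- B's single pass carrying the pending_key option; the final flush is the [] case.
def pvLoopB : List String → Option String → PySem.Dict String String → PySem.Dict String String
  | [], pending, parsed =>
    match pending with
    | some k => parsed.insert k ""
    | none => parsed
  | line :: rest, pending, parsed =>
    if PySem.Str.endswith line ":" then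
      let parsed' := match pending with
        | some k => parsed.insert k ""
        | none => parsed
      pvLoopB rest (some (PySem.Str.slice line none (some (-1)))) parsed'
    else
      match pending with
      | some k => pvLoopB rest none (parsed.insert k line)
      | none => pvLoopB rest none parsed

def parse_email_js_template_alt (data_string : String) : List (String × String) :=
  let lines := ((PySem.Str.splitlines data_string).filter
      (fun l => PySem.Str.strip l ≠ "")).map PySem.Str.strip
  (pvLoopB lines none PySem.Dict.empty).items

-- ===== PRECONDITION & SPEC =====
def Spec_parse_email_js_template (data_string : String) (out : List (String × String)) : Prop := out = parse_email_js_template_alt data_string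
instance (data_string : String) (out : List (String × String)) : Decidable (Spec_parse_email_js_template data_string out) := by unfold Spec_parse_email_js_template; infer_instance

-- ===== CLAIM (what is proved, stated in full; the proofs are below) =====
def Claim_equal_parse_email_js_template : Prop := ∀ (data_string : String), Dom_parse_email_js_template data_string → Spec_parse_email_js_template data_string (parse_email_js_template data_string)

-- ===== LEMMAS AND PROOFS =====

/-- Joint invariant: with no pending key B's loop equals A's loop, and with pending key k
B's loop equals A's "just saw key k" continuation. -/
theorem pvLoop_eq (lines : List String) :
    (∀ parsed, pvLoopB lines none parsed = pvLoopA lines parsed) ∧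
    (∀ parsed k, pvLoopB lines (some k) parsed =
      match lines with
      | [] => parsed.insert k ""
      | next :: rest =>
        if PySem.Str.endswith next ":" = false then pvLoopA rest (parsed.insert k next)
        else pvLoopA lines (parsed.insert k "")) := by
  induction lines with
  | nil => constructor <;> intros <;> simp [pvLoopA, pvLoopB]
  | cons line rest ih =>
    obtain ⟨ihn, ihs⟩ := ih
    by_cases h : PySem.Chars.endswith line.toList [':'] = true
    · constructor
      · intro parsed
        rw [show pvLoopB (line :: rest) none parsed
              = pvLoopB rest (some (PySem.Str.slice line none (some (-1)))) parsed by
            simp [pvLoopB, h]]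
        rw [ihs]
        cases rest with
        | nil => simp [pvLoopA, h]
        | cons next rest2 =>
          conv_rhs => rw [pvLoopA.eq_2]
          by_cases h2 : PySem.Chars.endswith next.toList [':'] = false <;>
            simp [h, h2]
      · intro parsed k
        rw [show pvLoopB (line :: rest) (some k) parsed
              = pvLoopB rest (some (PySem.Str.slice line none (some (-1)))) (parsed.insert k "") by
            simp [pvLoopB, h]]
        rw [ihs]
        have hs : PySem.Str.endswith line ":" = true := by simpa using h
        simp only [hs, Bool.true_eq_false, if_false]
        cases rest with
        | nil => simp [pvLoopA, h]
        | cons next rest2 =>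
          conv_rhs => rw [pvLoopA.eq_2]
          by_cases h2 : PySem.Chars.endswith next.toList [':'] = false <;>
            simp [h, h2]
    · simp only [Bool.not_eq_true] at h
      constructor
      · intro parsed
        rw [show pvLoopB (line :: rest) none parsed = pvLoopB rest none parsed by
            simp [pvLoopB, h]]
        rw [ihn]
        simp [pvLoopA, h]
      · intro parsed k
        rw [show pvLoopB (line :: rest) (some k) parsed
              = pvLoopB rest none (parsed.insert k line) by simp [pvLoopB, h]]
        rw [ihn]
        simp [h]

theorem pvLoopB_none (lines : List String) (parsed : PySem.Dict String String) :
    pvLoopB lines none parsed = pvLoopA lines parsed := (pvLoop_eq lines).1 parsed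

-- ===== VERDICT (by name: the statement is the Claim_ definition above) =====
theorem parse_email_js_template_spec : Claim_equal_parse_email_js_template := by
  intro s _
  unfold Spec_parse_email_js_template
  simp [parse_email_js_template, parse_email_js_template_alt, pvLoopB_none]
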